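-- pv_equiv track=rewrite | github.com/leonardolarrad/teg | misc/gen_members_visitor.py | format_forward_arguments
-- ===== SOURCE A (Python) =====
-- def format_forward_arguments(i):
--     """Format the forward arguments for `i` members.
--        Eg. _001, _002, _003, ...
--     """
--
--     arguments = [f'_{str(j).zfill(3)}' for j in range(1, i+1)]
--     formatted_arguments = ""
--
--     for idx, arg in enumerate(arguments):
--         if idx > 0 and idx % 20 == 0:
--             formatted_arguments += "\n            "
--         formatted_arguments += arg
--
--         if idx < len(arguments) - 1:
--             formatted_arguments += ", "
--
--     return formatted_arguments
-- ===== SOURCE B (Python) =====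
-- def format_forward_arguments(i):
--     """Format the forward arguments for `i` members.
--        Eg. _001, _002, _003, ...
--     """
--     args = [f'_{str(j).zfill(3)}' for j in range(1, i+1)]
--     chunks = [args[k:k+20] for k in range(0, len(args), 20)]
--     return ', \n            '.join(', '.join(c) for c in chunks)
-- ===== Notes on version B (the rewrite author's own statement) =====
-- stated objective: alternative
-- what changed: Replaces A's single accumulator loop with modulo-tested index branching by an explicit grouping pass (split the names into consecutive chunks of 20 by index slicing) followed by a two-level join (', ' inside a chunk, ', \n ' between chunks).
import Mathlib
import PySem

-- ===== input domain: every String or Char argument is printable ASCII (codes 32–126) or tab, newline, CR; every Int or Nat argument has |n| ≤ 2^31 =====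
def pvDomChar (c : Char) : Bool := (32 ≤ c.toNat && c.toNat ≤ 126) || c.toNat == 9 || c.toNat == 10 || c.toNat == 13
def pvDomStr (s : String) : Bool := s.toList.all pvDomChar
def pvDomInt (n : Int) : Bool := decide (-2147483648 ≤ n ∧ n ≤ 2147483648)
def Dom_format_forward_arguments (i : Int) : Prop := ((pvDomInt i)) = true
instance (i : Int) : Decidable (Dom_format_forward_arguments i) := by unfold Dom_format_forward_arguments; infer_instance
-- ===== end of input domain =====

-- B replaces A's accumulator loop (modulo-tested index branching) by a grouping pass into
-- chunks of 20 plus a two-level join — a different decomposition of the same O(n) task.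

-- ===== PORT A =====
-- arguments = [f'_{str(j).zfill(3)}' for j in range(1, i+1)]  (identical line in A and B)
def pvArgs (i : Int) : List String :=
  (PySem.List.pyRange 1 (i + 1) 1).map (fun j => "_" ++ PySem.Str.zfill (PySem.Int.toStr j) 3)

-- body of A's for-loop over enumerate(arguments); n = len(arguments)
def pvStepA (n : Int) (acc : String) (p : Int × String) : String :=
  let acc := if 0 < p.1 ∧ PySem.Int.mod p.1 20 = 0 then acc ++ "\n            " else acc
  let acc := acc ++ p.2
  if p.1 < n - 1 then acc ++ ", " else acc

def format_forward_arguments (i : Int) : String :=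
  let arguments := pvArgs i
  (PySem.List.enumerate arguments 0).foldl (pvStepA (arguments.length : Int)) ""

-- ===== PORT B =====
def format_forward_arguments_alt (i : Int) : String :=
  let args := pvArgs i
  -- chunks = [args[k:k+20] for k in range(0, len(args), 20)]
  let chunks := (PySem.List.pyRange 0 (args.length : Int) 20).map
    (fun k => PySem.List.slice args (some k) (some (k + 20)))
  PySem.Str.join ", \n            " (chunks.map (fun c => PySem.Str.join ", " c))

-- ===== PRECONDITION & SPEC =====
def Spec_format_forward_arguments (i : Int) (out : String) : Prop := out = format_forward_arguments_alt i
instance (i : Int) (out : String) : Decidable (Spec_format_forward_arguments i out) := by unfold Spec_format_forward_arguments; infer_instance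

-- ===== CLAIM (what is proved, stated in full; the proofs are below) =====
def Claim_equal_format_forward_arguments : Prop := ∀ (i : Int), Dom_format_forward_arguments i → Spec_format_forward_arguments i (format_forward_arguments i)

-- ===== LEMMAS AND PROOFS =====

-- B's chunking, restated as a structural recursion (proof vehicle)
def pvChunks (l : List String) : List (List String) :=
  if _h : l = [] then []
  else l.take 20 :: pvChunks (l.drop 20)
termination_by l.length
decreasing_by
  have : l.length ≠ 0 := fun hl => _h (List.eq_nil_of_length_eq_zero hl)
  simp only [List.length_drop]
  omega

lemma pvChunks_eq (l : List String) :
    pvChunks l = if l = [] then [] else l.take 20 :: pvChunks (l.drop 20) := by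
  rw [pvChunks]
  split_ifs <;> rfl

-- the index comprehension computes exactly pvChunks
lemma pvChunksNat (q : Nat) : ∀ (l : List String), (l.length + 19) / 20 = q →
    (List.range q).map (fun k => (l.drop (20 * k)).take 20) = pvChunks l := by
  induction q with
  | zero =>
    intro l hq
    have : l = [] := List.eq_nil_of_length_eq_zero (by omega)
    subst this
    simp [pvChunks_eq]
  | succ q ihq =>
    intro l hq
    have hl : l ≠ [] := by
      intro h; subst h; simp at hq
    rw [pvChunks_eq, if_neg hl, List.range_succ_eq_map, List.map_cons]
    simp only [Nat.mul_zero, List.drop_zero, List.map_map]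
    congr 1
    rw [← ihq (l.drop 20) (by have := List.length_drop (l := l) (i := 20); omega)]
    apply List.map_congr_left
    intro k _
    simp [List.drop_drop, Nat.succ_eq_add_one]
    ring_nf

lemma pvRangeChunks (l : List String) :
    (PySem.List.pyRange 0 (l.length : Int) 20).map
      (fun k => PySem.List.slice l (some k) (some (k + 20))) = pvChunks l := by
  rw [PySem.List.pyRange_of_pos 0 (l.length : Int) (by omega : (0:Int) < 20)]
  have hQ : (if (0:Int) < (l.length : Int) then (((l.length : Int) - 0 + 20 - 1) / 20).toNat else 0)
      = (l.length + 19) / 20 := by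
    split_ifs with h <;> omega
  rw [hQ, List.map_map, ← pvChunksNat ((l.length + 19) / 20) l rfl]
  apply List.map_congr_left
  intro k _
  have h1 : ((0:Int) + 20 * (k : Int)) = ((20 * k : Nat) : Int) := by push_cast; ring
  have h2 : ((20 * k : Nat) : Int) + 20 = ((20 * k + 20 : Nat) : Int) := by push_cast; ring
  simp only [Function.comp_def, h1, h2, PySem.List.slice_natCast]
  congr 1
  omega

-- countdown until the next line break: 20 at the very start, 0 exactly when idx > 0 ∧ idx % 20 = 0
def pvT (k : Nat) : Nat := if k % 20 = 0 then (if k = 0 then 20 else 0) else 20 - k % 20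

-- the characters A's loop emits from position k on, expressed through the countdown
def pvG (t : Nat) : List String → List Char
  | [] => []
  | a :: rest =>
      (if t = 0 then "\n            ".toList else []) ++ a.toList ++
        (if rest = [] then [] else ", ".toList) ++ pvG (if t = 0 then 19 else t - 1) rest

lemma pvG_nil (t : Nat) : pvG t [] = [] := rfl

lemma pvG_cons (t : Nat) (a : String) (rest : List String) :
    pvG t (a :: rest) = (if t = 0 then "\n            ".toList else []) ++ a.toList ++
      (if rest = [] then [] else ", ".toList) ++ pvG (if t = 0 then 19 else t - 1) rest := rfl

-- character-level value of B's two-level join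
def pvJ (l : List String) : List Char :=
  PySem.Chars.join ", \n            ".toList
    ((pvChunks l).map (fun c => PySem.Chars.join ", ".toList (c.map String.toList)))

lemma pvT_succ (k : Nat) : pvT (k + 1) = if pvT k = 0 then 19 else pvT k - 1 := by
  unfold pvT
  simp only [Nat.add_one_ne_zero, if_false]
  split_ifs <;> omega

lemma pvT_zero_iff (k : Nat) : pvT k = 0 ↔ (k ≠ 0 ∧ k % 20 = 0) := by
  unfold pvT
  split_ifs with h1 h2
  · simp_all
  · simp_all
  · omega

-- A's fold, started at index k with countdown pvT k, emits pvG (pvT k)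
lemma pvFoldA (n : Nat) (l : List String) : ∀ (k : Nat) (acc : String), k + l.length = n →
    ((PySem.List.enumerate l (k : Int)).foldl (pvStepA (n : Int)) acc).toList
      = acc.toList ++ pvG (pvT k) l := by
  induction l with
  | nil => intro k acc _; simp [PySem.List.enumerate_nil, pvG_nil]
  | cons a rest ih =>
    intro k acc h
    rw [PySem.List.enumerate_cons, List.foldl_cons]
    have hk1 : ((k : Int) + 1) = ((k + 1 : Nat) : Int) := by push_cast; ring
    rw [hk1, ih (k + 1) _ (by simp at h ⊢; omega)]
    rw [pvG_cons, pvT_succ]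
    have hm : PySem.Int.mod (k : Int) 20 = ((k % 20 : Nat) : Int) := by
      exact_mod_cast PySem.Int.mod_natCast k 20
    have hc1 : (0 < (k : Int) ∧ PySem.Int.mod (k : Int) 20 = 0) ↔ pvT k = 0 := by
      rw [hm, pvT_zero_iff]; omega
    have hc2 : ((k : Int) < (n : Int) - 1) ↔ ¬ rest = [] := by
      simp only [List.length_cons] at h
      cases rest with
      | nil => simp at h ⊢; omega
      | cons b bs => simp at h ⊢; omega
    show (pvStepA (n : Int) acc ((k : Int), a)).toList ++ _ = _
    unfold pvStepA
    simp only [hc1, hc2]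
    split_ifs with h1 h2 <;>
      simp_all [String.toList_append, List.append_assoc]

lemma pvJ_unfold (l : List String) (hl : l ≠ []) :
    pvJ l = PySem.Chars.join ", ".toList ((l.take 20).map String.toList) ++
      (if l.length ≤ 20 then [] else ", \n            ".toList ++ pvJ (l.drop 20)) := by
  unfold pvJ
  rw [pvChunks_eq, if_neg hl]
  by_cases h : l.length ≤ 20
  · have hd : l.drop 20 = [] := List.drop_eq_nil_of_le h
    rw [hd, pvChunks_eq]
    simp [PySem.Chars.join_singleton, h]
  · have hd : l.drop 20 ≠ [] := by
      intro hd
      have := List.drop_eq_nil_iff.mp hd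
      omega
    rw [if_neg h]
    obtain ⟨c, cs, hcs⟩ : ∃ c cs, (pvChunks (l.drop 20)).map
        (fun c => PySem.Chars.join ", ".toList (c.map String.toList)) = c :: cs := by
      rw [pvChunks_eq, if_neg hd, List.map_cons]
      exact ⟨_, _, rfl⟩
    rw [List.map_cons, hcs, PySem.Chars.join_cons_cons]
    simp [List.append_assoc]

-- the countdown recursion equals B's chunked join
lemma pvG_eq_join (N : Nat) : ∀ (l : List String), l.length ≤ N → ∀ t, 1 ≤ t → t ≤ 20 →
    pvG t l = PySem.Chars.join ", ".toList ((l.take t).map String.toList) ++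
      (if l.length ≤ t then [] else ", \n            ".toList ++ pvJ (l.drop t)) := by
  induction N with
  | zero =>
    intro l hl t ht1 ht2
    have : l = [] := List.eq_nil_of_length_eq_zero (by omega)
    subst this
    simp [pvG_nil, PySem.Chars.join_nil]
  | succ N ihN =>
    intro l hl t ht1 ht2
    cases l with
    | nil => simp [pvG_nil, PySem.Chars.join_nil]
    | cons a rest =>
      cases rest with
      | nil =>
        have hc : (a :: ([] : List String)).length ≤ t := by simp; omega
        have ht0 : ¬ t = 0 := by omega
        simp [pvG_cons, pvG_nil, PySem.Chars.join_singleton,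
          List.take_of_length_le hc, ht0]
      | cons b bs =>
        have hrest : (b :: bs : List String) ≠ [] := by simp
        have ht0 : ¬ t = 0 := by omega
        rw [pvG_cons, if_neg ht0, if_neg hrest, if_neg ht0]
        by_cases ht : t = 1
        · subst ht
          -- the next position starts a fresh chunk: pvG 0 (b::bs) = nl ++ pvG 20 (b::bs)
          have hG0 : pvG 0 (b :: bs) = "\n            ".toList ++ pvG 20 (b :: bs) := by
            rw [pvG_cons, pvG_cons]
            simp [List.append_assoc]
          simp only [Nat.sub_self, hG0]
          rw [ihN (b :: bs) (by simp at hl ⊢; omega) 20 (by omega) (by omega),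
            ← pvJ_unfold (b :: bs) hrest]
          have hsep : (", \n            ".toList : List Char)
              = ", ".toList ++ "\n            ".toList := rfl
          simp [PySem.Chars.join_singleton, List.append_assoc, hsep]
        · -- still inside the current chunk
          rw [ihN (b :: bs) (by simp at hl ⊢; omega) (t - 1) (by omega) (by omega)]
          have htake : ((a :: b :: bs).take t).map String.toList
              = a.toList :: ((b :: bs).take (t - 1)).map String.toList := by
            rw [show t = (t - 1) + 1 from by omega]
            simp
          rw [htake]
          have hnn : ((b :: bs).take (t - 1)).map String.toList ≠ [] := by
            simp [List.take_eq_nil_iff]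
            omega
          cases hcc : ((b :: bs).take (t - 1)).map String.toList with
          | nil => exact absurd hcc hnn
          | cons c cs =>
            rw [PySem.Chars.join_cons_cons, ← hcc]
            have hdrop : (a :: b :: bs).drop t = (b :: bs).drop (t - 1) := by
              rw [show t = (t - 1) + 1 from by omega]; simp
            rw [hdrop]
            by_cases hL : (b :: bs : List String).length ≤ t - 1
            · rw [if_pos hL, if_pos (by simp at hL ⊢; omega)]
              simp [List.append_assoc]
            · rw [if_neg hL, if_neg (by simp at hL ⊢; omega)]
              simp [List.append_assoc]

lemma pvG20_eq_pvJ (l : List String) : pvG 20 l = pvJ l := by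
  cases hl : l with
  | nil => simp [pvG_nil, pvJ, pvChunks_eq, PySem.Chars.join_nil]
  | cons a rest =>
    rw [← hl]
    rw [pvG_eq_join l.length l (le_refl _) 20 (by omega) (by omega),
      ← pvJ_unfold l (by rw [hl]; simp)]

lemma pvMain (args : List String) :
    (PySem.List.enumerate args 0).foldl (pvStepA (args.length : Int)) ""
      = PySem.Str.join ", \n            "
          (((PySem.List.pyRange 0 (args.length : Int) 20).map
              (fun k => PySem.List.slice args (some k) (some (k + 20)))).map
            (fun c => PySem.Str.join ", " c)) := by
  rw [pvRangeChunks]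
  apply String.toList_inj.mp
  rw [show ((0 : Int)) = ((0 : Nat) : Int) from rfl,
    pvFoldA args.length args 0 "" (by simp)]
  rw [show pvT 0 = 20 from rfl, pvG20_eq_pvJ, PySem.Str.toList_join]
  unfold pvJ
  simp [Function.comp_def, PySem.Str.toList_join]

-- ===== VERDICT (by name: the statement is the Claim_ definition above) =====
theorem format_forward_arguments_spec : Claim_equal_format_forward_arguments := by
  intro i _
  unfold Spec_format_forward_arguments format_forward_arguments format_forward_arguments_alt
  exact pvMain (pvArgs i)
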